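-- pv_equiv track=rewrite | github.com/jlapin1/spectral_similarity | fasta_to_peptides.py | tryptic_digest
-- ===== SOURCE A (Python) =====
-- def tryptic_digest(sequence):
--     # Define the cleavage rules: cleave after K or R, unless followed by P
--     peptides = []
--     current_peptide = []
--     for i in range(len(sequence)):
--         aa = sequence[i]
--         current_peptide.append(aa)
--
--         # Check for cleavage sites (K or R, not followed by P)
--         if aa in ['K', 'R'] and (i == len(sequence) - 1 or sequence[i + 1] != 'P'):
--             peptides.append(''.join(current_peptide))
--             current_peptide = []
--
--     # Add the last peptide if it exists
--     if current_peptide: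
--         peptides.append(''.join(current_peptide))
--
--     return peptides
-- ===== SOURCE B (Python) =====
-- def tryptic_digest(sequence):
--     # Locate every cleavage boundary first (after K/R not followed by P),
--     # then cut the sequence once with slices between consecutive boundaries.
--     cuts = [i + 1 for i, aa in enumerate(sequence)
--             if (aa == 'K' or aa == 'R') and sequence[i + 1:i + 2] != 'P']
--     bounds = [0] + cuts + [len(sequence)]
--     return [sequence[a:b] for a, b in zip(bounds, bounds[1:]) if a < b]
-- ===== Notes on version B (the rewrite author's own statement) =====
-- stated objective: alternative
-- what changed: B first locates all cleavage boundaries (index after each K/R not followed by P) in one enumerate pass, then cuts the sequence with slices between consecutive boundaries, replacing A's per-character accumulator loop that grows and flushes a current-peptide buffer.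
import Mathlib
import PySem

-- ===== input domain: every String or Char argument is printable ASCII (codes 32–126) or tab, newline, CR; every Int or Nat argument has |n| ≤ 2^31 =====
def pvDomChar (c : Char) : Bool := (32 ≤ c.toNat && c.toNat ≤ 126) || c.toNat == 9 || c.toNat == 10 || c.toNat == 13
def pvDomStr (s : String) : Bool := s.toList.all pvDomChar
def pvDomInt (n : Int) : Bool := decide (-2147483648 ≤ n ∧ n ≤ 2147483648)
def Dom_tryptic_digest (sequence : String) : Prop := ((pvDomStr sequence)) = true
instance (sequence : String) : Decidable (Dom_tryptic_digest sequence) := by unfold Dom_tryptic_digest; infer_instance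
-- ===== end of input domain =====

-- B locates all cleavage boundaries in one pass and then cuts the sequence with slices,
-- instead of A's per-character accumulator loop (objective: alternative, same cost).

-- ===== PORT A =====
-- loop body of A's 'for i in range(len(sequence))'
def trypAStep (l : List Char) (n : Int) (st : List String × List Char) (i : Int) :
    List String × List Char :=
  let aa := PySem.List.pyGetD l i ' '
  let cur := st.2 ++ [aa]
  if aa ∈ ['K', 'R'] ∧ (i = n - 1 ∨ PySem.List.pyGetD l (i + 1) ' ' ≠ 'P') then
    (st.1 ++ [String.ofList cur], [])
  else
    (st.1, cur)

def tryptic_digest (sequence : String) : List String :=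
  let l := sequence.toList
  let n : Int := (l.length : Int)
  let st := (PySem.List.pyRange 0 n 1).foldl (trypAStep l n) ([], [])
  if st.2 ≠ [] then st.1 ++ [String.ofList st.2] else st.1

-- ===== PORT B =====
-- the comprehension filter for a cleavage boundary after position ic.1
def trypCut? (l : List Char) (ic : Int × Char) : Option Int :=
  if (ic.2 = 'K' ∨ ic.2 = 'R') ∧ PySem.List.slice l (some (ic.1 + 1)) (some (ic.1 + 2)) ≠ ['P'] then
    some (ic.1 + 1)
  else none

-- the comprehension body over consecutive boundary pairs
def trypSeg? (l : List Char) (ab : Int × Int) : Option String :=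
  if ab.1 < ab.2 then some (String.ofList (PySem.List.slice l (some ab.1) (some ab.2))) else none

def tryptic_digest_alt (sequence : String) : List String :=
  let l := sequence.toList
  let cuts := (PySem.List.enumerate l).filterMap (trypCut? l)
  let bounds := (0 : Int) :: (cuts ++ [(l.length : Int)])
  (bounds.zip bounds.tail).filterMap (trypSeg? l)

-- ===== PRECONDITION & SPEC =====
def Spec_tryptic_digest (sequence : String) (out : List String) : Prop := out = tryptic_digest_alt sequence
instance (sequence : String) (out : List String) : Decidable (Spec_tryptic_digest sequence out) := by unfold Spec_tryptic_digest; infer_instance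

-- ===== CLAIM (what is proved, stated in full; the proofs are below) =====
def Claim_equal_tryptic_digest : Prop := ∀ (sequence : String), Dom_tryptic_digest sequence → Spec_tryptic_digest sequence (tryptic_digest sequence)

-- ===== LEMMAS AND PROOFS =====

-- common characterisation of both programs: digest the remaining characters,
-- cur being the pending peptide
def digestGo (cur : List Char) : List Char → List String
  | [] => if cur = [] then [] else [String.ofList cur]
  | c :: rest =>
    if (c = 'K' ∨ c = 'R') ∧ rest.head? ≠ some 'P' then
      String.ofList (cur ++ [c]) :: digestGo [] rest
    else
      digestGo (cur ++ [c]) rest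
def finishA (st : List String × List Char) : List String :=
  if st.2 ≠ [] then st.1 ++ [String.ofList st.2] else st.1

lemma trypA_loop (s : List Char) : ∀ (l : List Char) (k : Nat) (peps : List String)
    (cur : List Char), l.drop k = s →
    finishA (((PySem.List.pyRange (k : Int) (l.length : Int) 1)).foldl
        (trypAStep l (l.length : Int)) (peps, cur)) = peps ++ digestGo cur s := by
  induction s with
  | nil =>
      intro l k peps cur h
      have hk : l.length ≤ k := by
        have := congrArg List.length h; simp at this; omega
      rw [PySem.List.pyRange_one_eq_nil (by exact_mod_cast hk)]
      simp only [List.foldl_nil, finishA, digestGo]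
      split_ifs with h1 h2 <;> simp_all
  | cons c rest ih =>
      intro l k peps cur h
      have hk : k < l.length := by
        by_contra hk
        rw [List.drop_eq_nil_of_le (by omega)] at h
        exact List.cons_ne_nil _ _ h.symm
      have hget : l[k]? = some c := by
        rw [← List.head?_drop, h]; rfl
      have hdrop1 : l.drop (k + 1) = rest := by
        have : l.drop (k+1) = (l.drop k).drop 1 := by
          rw [List.drop_drop]
        rw [this, h]; rfl
      have hget1 : l[k+1]? = rest.head? := by
        rw [← List.head?_drop, hdrop1]
      have hlen : l.length = k + 1 + rest.length := by
        have := congrArg List.length h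
        simp at this; omega
      rw [PySem.List.pyRange_one_cons (by exact_mod_cast hk)]
      rw [List.foldl_cons]
      have haa : PySem.List.pyGetD l (k : Int) ' ' = c := by
        rw [PySem.List.pyGetD_natCast]
        simp [List.getD, hget]
      have haa1 : PySem.List.pyGetD l ((k : Int) + 1) ' ' = rest.head?.getD ' ' := by
        have : ((k : Int) + 1) = ((k + 1 : Nat) : Int) := by push_cast; ring
        rw [this, PySem.List.pyGetD_natCast]
        simp [List.getD, hget1]
      have hcond : (PySem.List.pyGetD l (k : Int) ' ' ∈ ['K', 'R'] ∧
          ((k : Int) = (l.length : Int) - 1 ∨ PySem.List.pyGetD l ((k : Int) + 1) ' ' ≠ 'P')) ↔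
          ((c = 'K' ∨ c = 'R') ∧ rest.head? ≠ some 'P') := by
        rw [haa, haa1]
        cases rest with
        | nil => simp
        | cons p t =>
            have hne : ¬((k : Int) = (l.length : Int) - 1) := by
              simp at hlen ⊢; omega
            simp [hne]
      have hcast : (k : Int) + 1 = ((k + 1 : Nat) : Int) := by push_cast; ring
      by_cases hc : (c = 'K' ∨ c = 'R') ∧ rest.head? ≠ some 'P'
      · have hstep : trypAStep l (l.length : Int) (peps, cur) (k : Int) =
            (peps ++ [String.ofList (cur ++ [c])], []) := by
          simp only [trypAStep]
          rw [if_pos (hcond.mpr hc), haa]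
        rw [hstep, hcast, ih l (k+1) (peps ++ [String.ofList (cur ++ [c])]) [] hdrop1]
        conv_rhs => rw [digestGo]
        rw [if_pos hc]
        simp
      · have hstep : trypAStep l (l.length : Int) (peps, cur) (k : Int) =
            (peps, cur ++ [c]) := by
          simp only [trypAStep]
          rw [if_neg (fun hx => hc (hcond.mp hx)), haa]
        rw [hstep, hcast, ih l (k+1) peps (cur ++ [c]) hdrop1]
        conv_rhs => rw [digestGo]
        rw [if_neg hc]

def segsB (l : List Char) : Int → List Int → List String
  | _, [] => []
  | a, b :: bs =>
      (if a < b then [String.ofList (PySem.List.slice l (some a) (some b))] else []) ++ segsB l b bs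

lemma trypB_zip (l : List Char) (bs : List Int) : ∀ (a : Int),
    (((a :: bs).zip (a :: bs).tail).filterMap (trypSeg? l)) = segsB l a bs := by
  induction bs with
  | nil => intro a; simp [segsB]
  | cons b bs ih =>
      intro a
      simp only [List.tail_cons, List.zip_cons_cons, List.filterMap_cons]
      rw [show (b :: bs).zip bs = ((b :: bs).zip (b :: bs).tail) from rfl] at *
      rw [ih b]
      conv_rhs => rw [segsB]
      unfold trypSeg?
      split_ifs with h <;> simp

lemma trypB_main (s : List Char) : ∀ (l : List Char) (k j : Nat) (cur : List Char),
    j + cur.length = k → l.drop j = cur ++ s →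
    segsB l (j : Int)
        (((PySem.List.enumerate s (k : Int)).filterMap (trypCut? l)) ++ [(l.length : Int)]) =
      digestGo cur s := by
  induction s with
  | nil =>
      intro l k j cur h1 h2
      simp only [List.append_nil] at h2
      rw [PySem.List.enumerate_nil, List.filterMap_nil, List.nil_append]
      rw [segsB, segsB]
      by_cases hc : cur = []
      · subst hc
        have hj : l.length ≤ j := by
          have := congrArg List.length h2; simp at this; omega
        rw [if_neg (by omega), digestGo]
        simp
      · have hj : j < l.length := by
          by_contra hj
          rw [List.drop_eq_nil_of_le (by omega)] at h2
          exact hc h2.symm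
        have hlen : l.length = j + cur.length := by
          have := congrArg List.length h2; simp at this; omega
        rw [if_pos (by omega)]
        rw [PySem.List.slice_natCast, h2]
        rw [digestGo, if_neg hc]
        have : l.length - j = cur.length := by omega
        simp [this]
  | cons c rest ih =>
      intro l k j cur h1 h2
      have hjk : j ≤ k := by omega
      have hdropk : l.drop k = c :: rest := by
        have : l.drop k = (l.drop j).drop cur.length := by
          rw [List.drop_drop]; congr 1; omega
        rw [this, h2, List.drop_left]
      have hk : k < l.length := by
        by_contra hk
        rw [List.drop_eq_nil_of_le (by omega)] at hdropk
        exact List.cons_ne_nil _ _ hdropk.symm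
      have hdrop1 : l.drop (k + 1) = rest := by
        have : l.drop (k+1) = (l.drop k).drop 1 := by rw [List.drop_drop]
        rw [this, hdropk]; rfl
      have hslice : PySem.List.slice l (some ((k : Int) + 1)) (some ((k : Int) + 2)) = rest.take 1 := by
        have e1 : (k : Int) + 1 = ((k + 1 : Nat) : Int) := by push_cast; ring
        have e2 : (k : Int) + 2 = ((k + 2 : Nat) : Int) := by push_cast; ring
        rw [e1, e2, PySem.List.slice_natCast, hdrop1]
        congr 1; omega
      have hcond : ((c = 'K' ∨ c = 'R') ∧
          PySem.List.slice l (some ((k : Int) + 1)) (some ((k : Int) + 2)) ≠ ['P']) ↔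
          ((c = 'K' ∨ c = 'R') ∧ rest.head? ≠ some 'P') := by
        rw [hslice]
        cases rest with
        | nil => simp
        | cons p t => simp
      rw [PySem.List.enumerate_cons, List.filterMap_cons]
      by_cases hc : (c = 'K' ∨ c = 'R') ∧ rest.head? ≠ some 'P'
      · have hcut : trypCut? l ((k : Int), c) = some ((k : Int) + 1) := by
          simp only [trypCut?]
          rw [if_pos (hcond.mpr hc)]
        rw [hcut]
        simp only [List.cons_append]
        rw [segsB, if_pos (by omega)]
        have hsl : PySem.List.slice l (some (j : Int)) (some ((k : Int) + 1)) = cur ++ [c] := by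
          have e1 : (k : Int) + 1 = ((k + 1 : Nat) : Int) := by push_cast; ring
          rw [e1, PySem.List.slice_natCast, h2]
          rw [List.take_append]
          have e2 : k + 1 - j = cur.length + 1 := by omega
          rw [e2]
          simp
        rw [hsl]
        have e1 : (k : Int) + 1 = ((k + 1 : Nat) : Int) := by push_cast; ring
        rw [e1, ih l (k+1) (k+1) [] (by simp) (by simpa using hdrop1)]
        conv_rhs => rw [digestGo]
        rw [if_pos hc]
        simp
      · have hcut : trypCut? l ((k : Int), c) = none := by
          simp only [trypCut?]
          rw [if_neg (fun hx => hc (hcond.mp hx))]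
        rw [hcut]
        have e1 : (k : Int) + 1 = ((k + 1 : Nat) : Int) := by push_cast; ring
        rw [e1, ih l (k+1) j (cur ++ [c]) (by simp; omega) (by rw [h2]; simp)]
        conv_rhs => rw [digestGo]
        rw [if_neg hc]

lemma trypA_eq (sequence : String) : tryptic_digest sequence = digestGo [] sequence.toList := by
  show finishA (((PySem.List.pyRange (((0 : Nat) : Int)) (sequence.toList.length : Int) 1)).foldl
      (trypAStep sequence.toList (sequence.toList.length : Int)) ([], [])) = _
  exact trypA_loop sequence.toList sequence.toList 0 [] [] (by simp)

lemma trypB_eq (sequence : String) :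
    tryptic_digest_alt sequence = digestGo [] sequence.toList := by
  unfold tryptic_digest_alt
  rw [trypB_zip]
  show segsB sequence.toList (((0 : Nat) : Int)) _ = _
  exact trypB_main sequence.toList sequence.toList 0 0 [] (by simp) (by simp)

-- ===== VERDICT (by name: the statement is the Claim_ definition above) =====
theorem tryptic_digest_spec : Claim_equal_tryptic_digest := by
  intro sequence _
  unfold Spec_tryptic_digest
  rw [trypA_eq, trypB_eq]
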